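-- pv_equiv track=rewrite | github.com/ZhijiaCHEN/VLDB-2023 | univeral_tree.py | _date_string_signature
-- ===== SOURCE A (Python) =====
-- def _date_string_signature(strList):
--     IS_NUMBER = 1
--     IS_ALPHA = 2
--     ret = []
--     for s in strList:
--         i = 0
--         signature = []
--         while i < len(s):
--             if s[i].isdigit():
--                 j = i + 1
--                 while j < len(s):
--                     if s[j].isdigit():
--                         j += 1
--                     else:
--                         break
--                 i = j
--                 signature.append(IS_NUMBER)
--             elif s[i].isalpha():
--                 j = i + 1
--                 while j < len(s):
--                     if s[j].isalpha():
--                         j += 1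
--                     else:
--                         break
--                 i = j
--                 signature.append(IS_ALPHA)
--             else:
--                 j = i + 1
--                 while j < len(s):
--                     if not s[j].isdigit() and not s[j].isalpha():
--                         j += 1
--                     else:
--                         break
--                 i = j
--                 signature.append(0)
--         ret.append(tuple(signature))
--     return tuple(ret)
-- ===== SOURCE B (Python) =====
-- def _date_string_signature(strList):
--     # single pass per string: classify each char, emit the class when it changes
--     ret = []
--     for s in strList:
--         sig = []
--         prev = None
--         for c in s:
--             k = 1 if c.isdigit() else 2 if c.isalpha() else 0
--             if k != prev:
--                 sig.append(k)
--                 prev = k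
--         ret.append(tuple(sig))
--     return tuple(ret)
-- ===== Notes on version B (the rewrite author's own statement) =====
-- stated objective: simpler
-- what changed: Replaces A's nested while-loops with manual index advancement over each run by a single pass per string that classifies every character (digit=1, alpha=2, other=0) and appends the class only when it differs from the previous one.
import Mathlib
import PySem

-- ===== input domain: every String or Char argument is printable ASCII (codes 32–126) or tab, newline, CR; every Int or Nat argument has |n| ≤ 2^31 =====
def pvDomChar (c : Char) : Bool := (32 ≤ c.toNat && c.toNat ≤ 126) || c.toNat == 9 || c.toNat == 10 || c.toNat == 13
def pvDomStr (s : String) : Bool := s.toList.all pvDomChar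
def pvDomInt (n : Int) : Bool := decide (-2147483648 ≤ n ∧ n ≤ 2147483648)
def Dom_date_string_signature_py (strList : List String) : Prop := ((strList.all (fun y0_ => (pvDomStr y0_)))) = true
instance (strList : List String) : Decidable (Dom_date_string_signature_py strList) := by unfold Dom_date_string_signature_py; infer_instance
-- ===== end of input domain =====

-- B replaces A's nested while-loops (per-run index advancement) by a single pass that
-- classifies each character and emits the class when it changes (simpler decomposition).


-- ===== PORT A =====
-- inner 'while j < len(s): if s[j].isdigit(): j += 1 else: break' — returns the suffix from j
def pvSkipDigits : List Char → List Char
  | [] => []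
  | c :: r => if c.isDigit then pvSkipDigits r else c :: r

def pvSkipAlpha : List Char → List Char
  | [] => []
  | c :: r => if c.isAlpha then pvSkipAlpha r else c :: r

def pvSkipOther : List Char → List Char
  | [] => []
  | c :: r => if ¬ c.isDigit ∧ ¬ c.isAlpha then pvSkipOther r else c :: r

theorem pvSkipDigits_len (l : List Char) : (pvSkipDigits l).length ≤ l.length := by
  induction l with
  | nil => simp [pvSkipDigits]
  | cons c r ih => simp only [pvSkipDigits]; split <;> simp <;> omega

theorem pvSkipAlpha_len (l : List Char) : (pvSkipAlpha l).length ≤ l.length := by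
  induction l with
  | nil => simp [pvSkipAlpha]
  | cons c r ih => simp only [pvSkipAlpha]; split <;> simp <;> omega

theorem pvSkipOther_len (l : List Char) : (pvSkipOther l).length ≤ l.length := by
  induction l with
  | nil => simp [pvSkipOther]
  | cons c r ih => simp only [pvSkipOther]; split <;> simp <;> omega

-- the outer 'while i < len(s)' loop of A, on the suffix of s starting at i
def pvSigA : List Char → List Int
  | [] => []
  | c :: rest =>
    if c.isDigit then 1 :: pvSigA (pvSkipDigits rest)
    else if c.isAlpha then 2 :: pvSigA (pvSkipAlpha rest)
    else 0 :: pvSigA (pvSkipOther rest)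
termination_by l => l.length
decreasing_by
  · exact Nat.lt_succ_of_le (pvSkipDigits_len rest)
  · exact Nat.lt_succ_of_le (pvSkipAlpha_len rest)
  · exact Nat.lt_succ_of_le (pvSkipOther_len rest)

def date_string_signature_py (strList : List String) : List (List Int) :=
  strList.map (fun s => pvSigA s.toList)

-- ===== PORT B =====
-- '1 if c.isdigit() else 2 if c.isalpha() else 0'
def pvClassify (c : Char) : Int := if c.isDigit then 1 else if c.isAlpha then 2 else 0

def date_string_signature_py_alt (strList : List String) : List (List Int) :=
  strList.map (fun s =>
    (s.toList.foldl
      (fun (st : List Int × Option Int) c =>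
        let k := pvClassify c
        if some k ≠ st.2 then (st.1 ++ [k], some k) else st)
      ([], none)).1)

-- ===== PRECONDITION & SPEC =====
def Spec_date_string_signature_py (strList : List String) (out : List (List Int)) : Prop := out = date_string_signature_py_alt strList
instance (strList : List String) (out : List (List Int)) : Decidable (Spec_date_string_signature_py strList out) := by unfold Spec_date_string_signature_py; infer_instance

-- ===== CLAIM (what is proved, stated in full; the proofs are below) =====
def Claim_equal_date_string_signature_py : Prop := ∀ (strList : List String), Dom_date_string_signature_py strList → Spec_date_string_signature_py strList (date_string_signature_py strList)

-- ===== LEMMAS AND PROOFS =====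
-- keysP prev ks: the classes B still emits given the last emitted class 'prev'
def pvKeysP : Option Int → List Int → List Int
  | _, [] => []
  | prev, k :: r => if prev = some k then pvKeysP prev r else k :: pvKeysP (some k) r

theorem pvDigit_not_alpha (c : Char) (h : c.isDigit = true) : c.isAlpha = false := by
  simp [Char.isDigit, Char.isAlpha, Char.isUpper, Char.isLower,
    Char.le_def, UInt32.le_iff_toNat_le] at h ⊢
  omega

theorem pvFoldl_spec (cs : List Char) (sig : List Int) (prev : Option Int) :
    (cs.foldl
      (fun (st : List Int × Option Int) c =>
        let k := pvClassify c
        if some k ≠ st.2 then (st.1 ++ [k], some k) else st)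
      (sig, prev)).1 = sig ++ pvKeysP prev (cs.map pvClassify) := by
  induction cs generalizing sig prev with
  | nil => simp [pvKeysP]
  | cons c r ih =>
    simp only [List.foldl_cons, List.map_cons]
    by_cases h : prev = some (pvClassify c)
    · have h2 : ¬ (some (pvClassify c) ≠ (sig, prev).2) := by simp [h]
      rw [if_neg h2, ih]
      simp [pvKeysP, h]
    · have h2 : some (pvClassify c) ≠ (sig, prev).2 := by simp [Ne.symm h]
      rw [if_pos h2, ih]
      simp [pvKeysP, h]

theorem pvKeysP_some (k : Int) (ks : List Int) :
    pvKeysP (some k) ks = pvKeysP none (ks.dropWhile (· == k)) := by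
  induction ks with
  | nil => simp [pvKeysP]
  | cons k' r ih =>
    by_cases h : k' = k
    · subst h; simpa [pvKeysP] using ih
    · simp [pvKeysP, h, Ne.symm h]

theorem pvMap_skipDigits (l : List Char) :
    (pvSkipDigits l).map pvClassify = (l.map pvClassify).dropWhile (· == 1) := by
  induction l with
  | nil => simp [pvSkipDigits]
  | cons c r ih =>
    by_cases h : c.isDigit
    · simp [pvSkipDigits, h, ih, pvClassify]
    · by_cases ha : c.isAlpha <;>
        simp [pvSkipDigits, h, ha, pvClassify]

theorem pvMap_skipAlpha (l : List Char) :
    (pvSkipAlpha l).map pvClassify = (l.map pvClassify).dropWhile (· == 2) := by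
  induction l with
  | nil => simp [pvSkipAlpha]
  | cons c r ih =>
    by_cases h : c.isAlpha
    · have hd := pvDigit_not_alpha c
      by_cases hdd : c.isDigit
      · rw [hd hdd] at h; exact absurd h (by simp)
      · simp [pvSkipAlpha, h, hdd, ih, pvClassify]
    · by_cases hd : c.isDigit <;>
        simp [pvSkipAlpha, h, hd, pvClassify]

theorem pvMap_skipOther (l : List Char) :
    (pvSkipOther l).map pvClassify = (l.map pvClassify).dropWhile (· == 0) := by
  induction l with
  | nil => simp [pvSkipOther]
  | cons c r ih =>
    by_cases hd : c.isDigit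
    · simp [pvSkipOther, hd, pvClassify]
    · by_cases ha : c.isAlpha <;>
        simp [pvSkipOther, hd, ha, ih, pvClassify]

theorem pvSigA_eq (cs : List Char) : pvSigA cs = pvKeysP none (cs.map pvClassify) := by
  match cs with
  | [] => simp [pvSigA, pvKeysP]
  | c :: rest =>
    by_cases hd : c.isDigit
    · have := pvSigA_eq (pvSkipDigits rest)
      simp [pvSigA, hd, pvKeysP, pvClassify, this, pvKeysP_some, pvMap_skipDigits]
    · by_cases ha : c.isAlpha
      · have := pvSigA_eq (pvSkipAlpha rest)
        simp [pvSigA, hd, ha, pvKeysP, pvClassify, this, pvKeysP_some, pvMap_skipAlpha]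
      · have := pvSigA_eq (pvSkipOther rest)
        simp [pvSigA, hd, ha, pvKeysP, pvClassify, this, pvKeysP_some, pvMap_skipOther]
termination_by cs.length
decreasing_by
  · exact Nat.lt_succ_of_le (pvSkipDigits_len rest)
  · exact Nat.lt_succ_of_le (pvSkipAlpha_len rest)
  · exact Nat.lt_succ_of_le (pvSkipOther_len rest)

-- ===== VERDICT (by name: the statement is the Claim_ definition above) =====
theorem date_string_signature_py_spec : Claim_equal_date_string_signature_py := by
  intro strList _
  unfold Spec_date_string_signature_py date_string_signature_py date_string_signature_py_alt
  refine List.map_congr_left (fun s _ => ?_)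
  rw [pvFoldl_spec, pvSigA_eq, List.nil_append]
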